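-- pv_equiv track=rewrite | github.com/NEUljw/IDKE | WN2WD/EM/Model_Combination1/models/Xlnet/xlnet.py | data_iter
-- ===== SOURCE A (Python) =====
-- def data_iter(data, batch_size):
--     """生成器"""
--     batch_num = len(data) // batch_size
--     if len(data) % batch_size != 0:
--         batch_num += 1
--     X1, X2, X3, X4 = [], [], [], []
--     for i in range(len(data)):
--         X1.append(data[i][0])
--         X2.append(data[i][1])
--         X3.append(data[i][2])
--         X4.append(data[i][3])
--         if len(X1) == batch_size or i == (len(data)-1):
--             yield X1, X2, X3, X4
--             X1, X2, X3, X4 = [], [], [], []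
-- ===== SOURCE B (Python) =====
-- def data_iter(data, batch_size):
--     """Batch generator: compute the chunk boundaries up front, then yield the
--     four field columns of each boundary-delimited chunk."""
--     if not data:
--         return
--     starts = [0] + list(range(batch_size, len(data), batch_size))
--     ends = starts[1:] + [len(data)]
--     for s, e in zip(starts, ends):
--         chunk = data[s:e]
--         yield ([r[0] for r in chunk], [r[1] for r in chunk],
--                [r[2] for r in chunk], [r[3] for r in chunk])
-- ===== Notes on version B (the rewrite author's own statement) =====
-- stated objective: simpler
-- what changed: B computes the chunk boundary lists up front (starts = [0]+range(batch_size, n, batch_size), ends = starts[1:]+[n]) and yields each boundary-delimited slice's four field columns as comprehensions, instead of A's element-by-element loop that maintains four accumulators, a fill counter and a last-index test.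
import Mathlib
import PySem

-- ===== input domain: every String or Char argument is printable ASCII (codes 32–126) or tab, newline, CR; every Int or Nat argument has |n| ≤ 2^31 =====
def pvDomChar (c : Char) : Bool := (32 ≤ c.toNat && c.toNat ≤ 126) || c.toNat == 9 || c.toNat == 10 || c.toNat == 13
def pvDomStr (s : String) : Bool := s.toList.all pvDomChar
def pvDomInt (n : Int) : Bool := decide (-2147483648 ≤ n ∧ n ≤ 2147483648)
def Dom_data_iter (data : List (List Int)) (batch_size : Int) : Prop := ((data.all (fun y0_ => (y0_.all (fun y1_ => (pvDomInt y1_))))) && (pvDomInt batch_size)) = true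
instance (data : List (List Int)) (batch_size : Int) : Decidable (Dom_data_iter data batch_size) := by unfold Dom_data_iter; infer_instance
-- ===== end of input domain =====

-- B replaces A's element-by-element loop with four accumulators by boundary-computed
-- slicing: same batches, simpler decomposition (objective: simpler, not faster).


-- ===== PORT A =====
-- the loop body of A: idxs is the remaining part of range(len(data)), X1..X4 the accumulators
def dataIterGo (data : List (List Int)) (batch_size : Int) (idxs : List Nat)
    (X1 X2 X3 X4 : List Int) : List (List Int × List Int × List Int × List Int) :=
  match idxs with
  | [] => []
  | i :: rest =>
    let row := data.getD i []          -- data[i]; i comes from range(len(data)), always in range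
    let X1' := X1 ++ [PySem.List.pyGetD row 0 0]
    let X2' := X2 ++ [PySem.List.pyGetD row 1 0]
    let X3' := X3 ++ [PySem.List.pyGetD row 2 0]
    let X4' := X4 ++ [PySem.List.pyGetD row 3 0]
    if (X1'.length : Int) = batch_size ∨ (i : Int) = (data.length : Int) - 1 then
      (X1', X2', X3', X4') :: dataIterGo data batch_size rest [] [] [] []
    else
      dataIterGo data batch_size rest X1' X2' X3' X4'

def data_iter (data : List (List Int)) (batch_size : Int) : List (List Int × List Int × List Int × List Int) :=
  -- batch_num is computed by A but never used; batch_size = 0 (ZeroDivisionError) is outside Pre_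
  let batch_num := PySem.Int.floordiv (data.length : Int) batch_size
  let _batch_num := if PySem.Int.mod (data.length : Int) batch_size ≠ 0 then batch_num + 1 else batch_num
  dataIterGo data batch_size (List.range data.length) [] [] [] []

-- ===== PORT B =====
def data_iter_alt (data : List (List Int)) (batch_size : Int) : List (List Int × List Int × List Int × List Int) :=
  if data = [] then []     -- `if not data: return`
  else
    let starts := (0 : Int) :: PySem.List.pyRange batch_size (data.length : Int) batch_size
    let ends := PySem.List.slice starts (some 1) none ++ [(data.length : Int)]   -- starts[1:] + [len(data)]
    (starts.zip ends).map (fun se =>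
      let chunk := PySem.List.slice data (some se.1) (some se.2)
      (chunk.map (fun r => PySem.List.pyGetD r 0 0),
       chunk.map (fun r => PySem.List.pyGetD r 1 0),
       chunk.map (fun r => PySem.List.pyGetD r 2 0),
       chunk.map (fun r => PySem.List.pyGetD r 3 0)))

-- ===== PRECONDITION & SPEC =====
-- Pre_ excludes only the inputs on which A raises: batch_size = 0 (ZeroDivisionError)
-- and rows with fewer than 4 fields (IndexError).
def Pre_data_iter (data : List (List Int)) (batch_size : Int) : Prop :=
  batch_size ≠ 0 ∧ ∀ row ∈ data, 4 ≤ row.length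
instance (data : List (List Int)) (batch_size : Int) : Decidable (Pre_data_iter data batch_size) := by
  unfold Pre_data_iter; infer_instance
def pvWitness_data_iter : List (List Int) × Int :=
  ([[1, 2, 3, 4], [5, 6, 7, 8], [9, 10, 11, 12]], 2)

def Spec_data_iter (data : List (List Int)) (batch_size : Int) (out : List (List Int × List Int × List Int × List Int)) : Prop := out = data_iter_alt data batch_size
instance (data : List (List Int)) (batch_size : Int) (out : List (List Int × List Int × List Int × List Int)) : Decidable (Spec_data_iter data batch_size out) := by unfold Spec_data_iter; infer_instance

-- ===== CLAIM (what is proved, stated in full; the proofs are below) =====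
def Claim_equal_data_iter : Prop := ∀ (data : List (List Int)) (batch_size : Int), Dom_data_iter data batch_size → Pre_data_iter data batch_size → Spec_data_iter data batch_size (data_iter data batch_size)

-- ===== LEMMAS AND PROOFS =====

-- common chunked form both ports are reduced to
def chunkSpec (b : Nat) (l : List (List Int)) : List (List Int × List Int × List Int × List Int) :=
  match l with
  | [] => []
  | x :: xs =>
    if b = 0 then [] else
      ((( x :: xs).take b).map (fun r => PySem.List.pyGetD r 0 0),
       (((x :: xs).take b)).map (fun r => PySem.List.pyGetD r 1 0),
       (((x :: xs).take b)).map (fun r => PySem.List.pyGetD r 2 0),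
       (((x :: xs).take b)).map (fun r => PySem.List.pyGetD r 3 0)) :: chunkSpec b ((x :: xs).drop b)
termination_by l.length
decreasing_by simp; omega

lemma chunkSpec_cons (b : Nat) (hb : b ≠ 0) (x : List Int) (xs : List (List Int)) :
    chunkSpec b (x :: xs)
    = (((x :: xs).take b).map (fun r => PySem.List.pyGetD r 0 0),
       ((x :: xs).take b).map (fun r => PySem.List.pyGetD r 1 0),
       ((x :: xs).take b).map (fun r => PySem.List.pyGetD r 2 0),
       ((x :: xs).take b).map (fun r => PySem.List.pyGetD r 3 0)) :: chunkSpec b ((x :: xs).drop b) := by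
  rw [chunkSpec, if_neg hb]

lemma pyRange_pos_cons (a b s : Int) (hs : 0 < s) (hab : a < b) :
    PySem.List.pyRange a b s = a :: PySem.List.pyRange (a + s) b s := by
  rw [PySem.List.pyRange_of_pos _ _ hs, PySem.List.pyRange_of_pos _ _ hs]
  have hc : (if a < b then ((b - a + s - 1) / s).toNat else 0)
      = (if a + s < b then ((b - (a + s) + s - 1) / s).toNat else 0) + 1 := by
    rw [if_pos hab]
    by_cases h2 : a + s < b
    · rw [if_pos h2]
      have he : b - a + s - 1 = (b - (a + s) + s - 1) + 1 * s := by ring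
      rw [he, Int.add_mul_ediv_right _ _ (by omega)]
      have hnn : 0 ≤ (b - (a + s) + s - 1) / s :=
        Int.ediv_nonneg (by omega) (by omega)
      omega
    · rw [if_neg h2]
      have h1 : (1 : Int) ≤ (b - a + s - 1) / s := by
        rw [Int.le_ediv_iff_mul_le hs]; omega
      have h2' : (b - a + s - 1) / s < 2 := by
        rw [Int.ediv_lt_iff_lt_mul hs]; omega
      omega
  rw [hc, List.range_succ_eq_map, List.map_cons]
  simp only [Nat.cast_zero, mul_zero, add_zero, List.map_map]
  congr 1
  apply List.map_congr_left
  intro k _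
  simp only [Function.comp_apply, Nat.cast_succ]
  ring

lemma pyRange_neg_nil (a b s : Int) (hs : s < 0) (hab : a ≤ b) :
    PySem.List.pyRange a b s = [] := by
  simp only [PySem.List.pyRange]
  rw [if_neg (by omega)]
  rw [if_neg (by omega), if_neg (by omega)]
  simp

-- B's zip of boundary starts/ends, for a positive batch_size, produces the chunks
lemma alt_zip (data : List (List Int)) (bs : Int) (hbs : 1 ≤ bs) :
    ∀ (m : Nat) (a : Int), 0 ≤ a → a < (data.length : Int) →
    ((data.length : Int) - a).toNat ≤ m →
    (((a :: PySem.List.pyRange (a + bs) (data.length : Int) bs).zip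
        (PySem.List.pyRange (a + bs) (data.length : Int) bs ++ [(data.length : Int)])).map (fun se =>
      let chunk := PySem.List.slice data (some se.1) (some se.2)
      (chunk.map (fun r => PySem.List.pyGetD r 0 0),
       chunk.map (fun r => PySem.List.pyGetD r 1 0),
       chunk.map (fun r => PySem.List.pyGetD r 2 0),
       chunk.map (fun r => PySem.List.pyGetD r 3 0))))
    = chunkSpec bs.toNat (data.drop a.toNat) := by
  intro m
  induction m with
  | zero => intro a ha hlt hm; omega
  | succ m ih =>
    intro a ha hlt hm
    have hne : data.drop a.toNat ≠ [] := by
      intro h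
      rw [List.drop_eq_nil_iff] at h
      omega
    obtain ⟨y, ys, hys⟩ := List.exists_cons_of_ne_nil hne
    by_cases h2 : a + bs < (data.length : Int)
    · rw [pyRange_pos_cons _ _ _ (by omega) h2]
      have hih := ih (a + bs) (by omega) h2 (by omega)
      simp only [List.zip_cons_cons, List.cons_append, List.map_cons]
      have hslice : PySem.List.slice data (some a) (some (a + bs))
          = (data.drop a.toNat).take bs.toNat := by
        rw [PySem.List.slice_toNat]
        · congr 1
          omega
        · omega
        · omega
      have hdd : data.drop (a + bs).toNat = (data.drop a.toNat).drop bs.toNat := by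
        rw [List.drop_drop]
        congr 1
        omega
      rw [hdd] at hih
      rw [hys] at hih ⊢
      rw [chunkSpec_cons _ (by omega)]
      simp only [hslice, hys]
      exact congrArg₂ _ rfl hih
    · rw [PySem.List.pyRange_of_pos _ _ (by omega : (0:Int) < bs), if_neg (by omega)]
      simp only [List.range_zero, List.map_nil, List.nil_append, List.zip_cons_cons,
        List.zip_nil_left, List.map_cons, List.map_nil]
      have hslice : PySem.List.slice data (some a) (some (data.length : Int))
          = data.drop a.toNat := by
        rw [PySem.List.slice_toNat]
        · apply List.take_of_length_le
          simp only [List.length_drop]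
          omega
        · omega
        · omega
      have hlen : (data.drop a.toNat).length ≤ bs.toNat := by
        simp only [List.length_drop]
        omega
      rw [hys] at hlen ⊢
      rw [chunkSpec_cons _ (by omega), List.take_of_length_le hlen, List.drop_of_length_le hlen]
      simp [chunkSpec, hslice, hys]

-- for a negative batch_size, A's counter never fires and it emits one batch of everything
lemma goA_neg (data : List (List Int)) (bs : Int) (hbs : bs < 0) :
    ∀ (m i : Nat) (cs : List (List Int)), m = data.length - i → i ≤ data.length → 0 < m →
    dataIterGo data bs (List.range' i m)
      (cs.map (fun r => PySem.List.pyGetD r 0 0))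
      (cs.map (fun r => PySem.List.pyGetD r 1 0))
      (cs.map (fun r => PySem.List.pyGetD r 2 0))
      (cs.map (fun r => PySem.List.pyGetD r 3 0))
    = [((cs ++ data.drop i).map (fun r => PySem.List.pyGetD r 0 0),
        (cs ++ data.drop i).map (fun r => PySem.List.pyGetD r 1 0),
        (cs ++ data.drop i).map (fun r => PySem.List.pyGetD r 2 0),
        (cs ++ data.drop i).map (fun r => PySem.List.pyGetD r 3 0))] := by
  intro m
  induction m with
  | zero => intro i cs hm hi h0; omega
  | succ m ih =>
    intro i cs hm hi h0
    have hilt : i < data.length := by omega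
    rw [List.range'_succ, dataIterGo]
    have hrow : data.getD i [] = data[i] := List.getD_eq_getElem data [] hilt
    set row := data[i] with hrowdef
    have hdropi : data.drop i = row :: data.drop (i + 1) := by
      rw [hrowdef, List.getElem_cons_drop]
    have hassoc : cs ++ data.drop i = (cs ++ [row]) ++ data.drop (i + 1) := by
      rw [hdropi]; simp
    have hmap0 : cs.map (fun r => PySem.List.pyGetD r 0 0) ++ [PySem.List.pyGetD row 0 0]
        = (cs ++ [row]).map (fun r => PySem.List.pyGetD r 0 0) := by simp
    have hmap1 : cs.map (fun r => PySem.List.pyGetD r 1 0) ++ [PySem.List.pyGetD row 1 0]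
        = (cs ++ [row]).map (fun r => PySem.List.pyGetD r 1 0) := by simp
    have hmap2 : cs.map (fun r => PySem.List.pyGetD r 2 0) ++ [PySem.List.pyGetD row 2 0]
        = (cs ++ [row]).map (fun r => PySem.List.pyGetD r 2 0) := by simp
    have hmap3 : cs.map (fun r => PySem.List.pyGetD r 3 0) ++ [PySem.List.pyGetD row 3 0]
        = (cs ++ [row]).map (fun r => PySem.List.pyGetD r 3 0) := by simp
    simp only [hrow, hmap0, hmap1, hmap2, hmap3]
    by_cases hlast : m = 0
    · subst hlast
      have hieq : i + 1 = data.length := by omega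
      rw [if_pos (Or.inr (by omega))]
      rw [List.range'_zero, dataIterGo]
      have hdropnil : data.drop (i + 1) = [] := by
        apply List.drop_eq_nil_of_le; omega
      rw [hassoc, hdropnil, List.append_nil]
    · have hcond : ¬ (((((cs ++ [row]).map (fun r => PySem.List.pyGetD r 0 0)).length : Int) = bs)
          ∨ ((i : Nat) : Int) = ((data.length : Int) - 1)) := by
        simp only [not_or]
        constructor
        · simp only [List.length_map, List.length_append, List.length_cons, List.length_nil]
          push_cast
          omega
        · omega
      rw [if_neg hcond]
      rw [ih (i + 1) (cs ++ [row]) (by omega) (by omega) (by omega)]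
      rw [hassoc]

lemma goA_chunk (data : List (List Int)) (bs : Int) (hbs : 1 ≤ bs) :
    ∀ (m i : Nat) (cs : List (List Int)), m = data.length - i → i ≤ data.length →
    ((cs.length : Int) < bs) → (cs = [] ∨ i < data.length) →
    dataIterGo data bs (List.range' i m)
      (cs.map (fun r => PySem.List.pyGetD r 0 0))
      (cs.map (fun r => PySem.List.pyGetD r 1 0))
      (cs.map (fun r => PySem.List.pyGetD r 2 0))
      (cs.map (fun r => PySem.List.pyGetD r 3 0))
    = chunkSpec bs.toNat (cs ++ data.drop i) := by
  intro m
  induction m with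
  | zero =>
    intro i cs hm hi hcs hdisj
    have hieq : i = data.length := by omega
    have hcnil : cs = [] := by
      rcases hdisj with h | h
      · exact h
      · omega
    subst hcnil hieq
    simp [dataIterGo, chunkSpec, List.drop_eq_nil_of_le (le_refl data.length)]
  | succ m ih =>
    intro i cs hm hi hcs hdisj
    have hilt : i < data.length := by omega
    rw [List.range'_succ]
    have hrow : data.getD i [] = data[i] := List.getD_eq_getElem data [] hilt
    have hdropi : data.drop i = data[i] :: data.drop (i + 1) := by
      rw [List.getElem_cons_drop]
    set row := data[i] with hrowdef
    have hmap0 : cs.map (fun r => PySem.List.pyGetD r 0 0) ++ [PySem.List.pyGetD row 0 0]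
        = (cs ++ [row]).map (fun r => PySem.List.pyGetD r 0 0) := by simp
    have hmap1 : cs.map (fun r => PySem.List.pyGetD r 1 0) ++ [PySem.List.pyGetD row 1 0]
        = (cs ++ [row]).map (fun r => PySem.List.pyGetD r 1 0) := by simp
    have hmap2 : cs.map (fun r => PySem.List.pyGetD r 2 0) ++ [PySem.List.pyGetD row 2 0]
        = (cs ++ [row]).map (fun r => PySem.List.pyGetD r 2 0) := by simp
    have hmap3 : cs.map (fun r => PySem.List.pyGetD r 3 0) ++ [PySem.List.pyGetD row 3 0]
        = (cs ++ [row]).map (fun r => PySem.List.pyGetD r 3 0) := by simp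
    have hlen : ((cs.map (fun r => PySem.List.pyGetD r 0 0) ++ [PySem.List.pyGetD row 0 0]).length : Int)
        = (cs.length : Int) + 1 := by simp
    have hassoc : cs ++ data.drop i = (cs ++ [row]) ++ data.drop (i + 1) := by
      rw [hdropi]; simp
    rw [dataIterGo]
    simp only [hrow, hmap0, hmap1, hmap2, hmap3]
    by_cases hfull : (((cs ++ [row]).map (fun r => PySem.List.pyGetD r 0 0)).length : Int) = bs
    · rw [if_pos (Or.inl hfull)]
      have hlen' : ((cs ++ [row]).length : Int) = bs := by
        simpa using hfull
      have hih := ih (i + 1) [] (by omega) (by omega) (by simpa using hbs) (Or.inl rfl)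
      simp only [List.map_nil, List.nil_append] at hih
      rw [hih, hassoc]
      have hne : (cs ++ [row]) ++ data.drop (i + 1) ≠ [] := by simp
      obtain ⟨y, ys, hys⟩ := List.exists_cons_of_ne_nil hne
      rw [hys, chunkSpec_cons _ (by omega), ← hys]
      have htake : ((cs ++ [row]) ++ data.drop (i + 1)).take bs.toNat = cs ++ [row] := by
        rw [List.take_append_of_le_length (by omega)]
        apply List.take_of_length_le
        omega
      have hdrop : ((cs ++ [row]) ++ data.drop (i + 1)).drop bs.toNat = data.drop (i + 1) := by
        rw [List.drop_append_of_le_length (by omega)]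
        rw [List.drop_of_length_le (by omega)]
        simp
      rw [htake, hdrop]
    · by_cases hlast : ((i : Nat) : Int) = (data.length : Int) - 1
      · rw [if_pos (Or.inr hlast)]
        have hieq : i + 1 = data.length := by omega
        have hdropnil : data.drop (i + 1) = [] := by
          apply List.drop_eq_nil_of_le; omega
        have hih := ih (i + 1) [] (by omega) (by omega) (by simpa using hbs) (Or.inl rfl)
        simp only [List.map_nil, List.nil_append, hdropnil] at hih
        rw [List.range'_eq_nil_iff.mpr (by omega)] at hih ⊢
        rw [hih, hassoc, hdropnil, List.append_nil]
        have hne : cs ++ [row] ≠ [] := by simp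
        obtain ⟨y, ys, hys⟩ := List.exists_cons_of_ne_nil hne
        rw [hys, chunkSpec_cons _ (by omega), ← hys]
        have hlen2 : (cs ++ [row]).length ≤ bs.toNat := by
          have : ((cs ++ [row]).length : Int) = (cs.length : Int) + 1 := by simp
          omega
        rw [List.take_of_length_le hlen2, List.drop_of_length_le hlen2]
      · rw [if_neg (by simp only [not_or]; exact ⟨hfull, hlast⟩)]
        have hlt2 : i + 1 < data.length := by omega
        have hcs' : (((cs ++ [row]).length : Int)) < bs := by
          have : (((cs ++ [row]).map (fun r => PySem.List.pyGetD r 0 0)).length : Int)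
              = ((cs ++ [row]).length : Int) := by simp
          have hle : ((cs ++ [row]).length : Int) ≤ bs := by
            simp only [List.length_append, List.length_cons, List.length_nil]
            push_cast
            omega
          rcases lt_or_eq_of_le hle with h | h
          · exact h
          · exact absurd (by rw [this, h]) hfull
        have hih := ih (i + 1) (cs ++ [row]) (by omega) (by omega) hcs' (Or.inr hlt2)
        rw [hih, hassoc]

-- ===== VERDICT (by name: the statement is the Claim_ definition above) =====
theorem data_iter_spec : Claim_equal_data_iter := by
  intro data batch_size _hdom hpre
  obtain ⟨hbs0, _⟩ := hpre
  unfold Spec_data_iter data_iter data_iter_alt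
  by_cases hnil : data = []
  · subst hnil
    simp [dataIterGo]
  · rw [if_neg hnil]
    have hlen : 0 < data.length := List.length_pos_iff.mpr hnil
    simp only [PySem.List.slice_from_one, List.tail_cons]
    rcases lt_or_gt_of_ne hbs0 with hneg | hpos
    · -- negative batch_size: one batch of everything on both sides
      have hA := goA_neg data batch_size hneg data.length 0 [] (by omega) (by omega) hlen
      simp only [List.map_nil, List.drop_zero, List.nil_append] at hA
      simp only [List.range_eq_range', hA]
      simp only [pyRange_neg_nil _ _ _ hneg (by omega : batch_size ≤ (data.length:Int))]
      have hslice : PySem.List.slice data (some 0) (some (data.length : Int)) = data := by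
        rw [PySem.List.slice_toNat]
        · simp
        · omega
        · omega
      simp [hslice]

    · -- positive batch_size: both sides are the bs-sized chunking
      have hbs : 1 ≤ batch_size := hpos
      have hA := goA_chunk data batch_size hbs data.length 0 [] (by omega) (by omega)
          (by simpa using hbs) (Or.inl rfl)
      simp only [List.map_nil, List.nil_append, List.drop_zero] at hA
      simp only [List.range_eq_range', hA]
      have hB := alt_zip data batch_size hbs data.length 0 (by omega) (by omega) (by omega)
      simp only [zero_add, Int.toNat_zero, List.drop_zero] at hB
      simp only [hB]
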